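-- pv_equiv track=rewrite | github.com/Fidget-Spinner/trace-analyzer | src/test/bad_benchmark_guided.py | foo
-- ===== SOURCE A (Python) =====
-- def foo(x, loops):
--     x = 0
--     for i in range(loops):
--         if i < 100000:
--             x = 1
--         else:
--             x = x + 2
--     return x
-- ===== SOURCE B (Python) =====
-- def foo(x, loops):
--     # closed form: loop ends at 1 while i<100000, then adds 2 each iteration
--     if loops <= 0:
--         return 0
--     if loops <= 100000:
--         return 1
--     return 1 + 2 * (loops - 100000)
-- ===== Notes on version B (the rewrite author's own statement) =====
-- stated objective: faster
-- what changed: replaced the O(loops) accumulation loop by a closed-form case formula (0 / 1 / 1+2*(loops-100000))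
import Mathlib
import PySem

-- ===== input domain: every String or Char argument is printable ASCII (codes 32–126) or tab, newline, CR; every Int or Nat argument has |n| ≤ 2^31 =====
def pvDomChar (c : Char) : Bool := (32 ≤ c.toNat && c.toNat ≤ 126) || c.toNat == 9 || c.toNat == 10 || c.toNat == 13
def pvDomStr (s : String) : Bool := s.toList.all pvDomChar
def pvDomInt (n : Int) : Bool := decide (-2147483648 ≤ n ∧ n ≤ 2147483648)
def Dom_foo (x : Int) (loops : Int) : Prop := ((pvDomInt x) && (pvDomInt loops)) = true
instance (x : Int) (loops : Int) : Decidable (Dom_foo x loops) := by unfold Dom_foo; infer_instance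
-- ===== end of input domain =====

-- B replaces A's O(loops) accumulation loop by a closed-form O(1) case formula.


-- ===== PORT A =====
-- A rebinds x to 0 immediately, then folds the loop body over range(loops).
def foo (_x : Int) (loops : Int) : Int :=
  (PySem.List.pyRange 0 loops 1).foldl (fun x i => if i < 100000 then 1 else x + 2) 0

-- ===== PORT B =====
def foo_alt (_x : Int) (loops : Int) : Int :=
  if loops ≤ 0 then 0
  else if loops ≤ 100000 then 1
  else 1 + 2 * (loops - 100000)

-- ===== PRECONDITION & SPEC =====
def Spec_foo (x : Int) (loops : Int) (out : Int) : Prop := out = foo_alt x loops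
instance (x : Int) (loops : Int) (out : Int) : Decidable (Spec_foo x loops out) := by unfold Spec_foo; infer_instance

-- ===== CLAIM (what is proved, stated in full; the proofs are below) =====
def Claim_equal_foo : Prop := ∀ (x : Int) (loops : Int), Dom_foo x loops → Spec_foo x loops (foo x loops)

-- ===== LEMMAS AND PROOFS =====
lemma fold_low (l : List Int) (a : Int) (h : ∀ i ∈ l, i < 100000) :
    l.foldl (fun x i => if i < 100000 then 1 else x + 2) a = if l = [] then a else 1 := by
  induction l generalizing a with
  | nil => simp
  | cons b t ih =>
    simp only [List.foldl_cons, if_pos (h b (List.mem_cons_self))]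
    rw [ih 1 (fun i hi => h i (List.mem_cons_of_mem _ hi))]
    split_ifs <;> simp_all

lemma fold_high (l : List Int) (a : Int) (h : ∀ i ∈ l, ¬ i < 100000) :
    l.foldl (fun x i => if i < 100000 then 1 else x + 2) a = a + 2 * l.length := by
  induction l generalizing a with
  | nil => simp
  | cons b t ih =>
    simp only [List.foldl_cons, if_neg (h b (List.mem_cons_self))]
    rw [ih (a + 2) (fun i hi => h i (List.mem_cons_of_mem _ hi))]
    simp; ring

-- ===== VERDICT (by name: the statement is the Claim_ definition above) =====
theorem foo_spec : Claim_equal_foo := by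
  intro x loops _
  unfold Spec_foo foo foo_alt
  by_cases h0 : loops ≤ 0
  · rw [PySem.List.pyRange_one_eq_nil h0]
    simp [h0]
  · push_neg at h0
    by_cases h1 : loops ≤ 100000
    · have hne : PySem.List.pyRange 0 loops 1 ≠ [] := by
        apply List.ne_nil_of_length_pos
        rw [PySem.List.length_pyRange_one]
        omega
      rw [fold_low _ _ (fun i hi => by
        have := (PySem.List.mem_pyRange_one).mp hi; omega)]
      simp [hne]
      omega
    · push_neg at h1
      rw [PySem.List.pyRange_one_append 0 100000 loops (by omega) (by omega),
        List.foldl_append]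
      have hne : PySem.List.pyRange 0 100000 1 ≠ [] := by
        apply List.ne_nil_of_length_pos
        rw [PySem.List.length_pyRange_one]
        omega
      rw [fold_high _ _ (fun i hi => by
        have := (PySem.List.mem_pyRange_one).mp hi; omega),
        fold_low _ _ (fun i hi => by
        have := (PySem.List.mem_pyRange_one).mp hi; omega), if_neg hne,
        PySem.List.length_pyRange_one]
      have : ((loops - 100000).toNat : Int) = loops - 100000 := by omega
      rw [this]
      split_ifs <;> omega
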